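-- pv_equiv track=rewrite | github.com/JustNETOrgani/cryptoCoursePlayground | numberTheoryPractice.py | nthRootOfNumberInModulus
-- ===== SOURCE A (Python) =====
-- def nthRootOfNumberInModulus(power, modulus,needed):
--     modRange = [x for x in range(modulus) if x >=1]
--     hasPowerInMod = list()
--     ans = list()
--     i = 1
--     while i < modulus:
--         computedPow = pow(i,power) % modulus
--         if computedPow in modRange:
--             hasPowerInMod.append(i)
--         if computedPow==needed:
--             ans.append(i)
--         i+=1
--     return hasPowerInMod, ans
-- ===== SOURCE B (Python) =====
-- def nthRootOfNumberInModulus(power, modulus, needed):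
--     # group bases by their modular power once (a hash index); both outputs are
--     # then read off the index: the nonzero buckets merged, and the bucket at `needed`
--     buckets = {}
--     for i in range(1, modulus):
--         buckets.setdefault(pow(i, power, modulus), []).append(i)
--     hasPowerInMod = sorted(x for r, xs in buckets.items() if r != 0 for x in xs)
--     ans = buckets.get(needed, [])
--     return hasPowerInMod, ans
-- ===== Notes on version B (the rewrite author's own statement) =====
-- stated objective: faster
-- what changed: A's interleaved two-accumulator scan (full bignum pow, then a linear membership test against range(modulus)) is replaced by a hash index: one grouping pass buckets each base under its modular power pow(i,power,modulus), then hasPowerInMod is the merge of the nonzero buckets and ans is a single dict lookup at needed.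
-- outside the precondition, e.g. on nthRootOfNumberInModulus(-1, 5, 1): A returns ([1], [1]), B returns ([1, 2, 3, 4], [1])
import Mathlib
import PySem

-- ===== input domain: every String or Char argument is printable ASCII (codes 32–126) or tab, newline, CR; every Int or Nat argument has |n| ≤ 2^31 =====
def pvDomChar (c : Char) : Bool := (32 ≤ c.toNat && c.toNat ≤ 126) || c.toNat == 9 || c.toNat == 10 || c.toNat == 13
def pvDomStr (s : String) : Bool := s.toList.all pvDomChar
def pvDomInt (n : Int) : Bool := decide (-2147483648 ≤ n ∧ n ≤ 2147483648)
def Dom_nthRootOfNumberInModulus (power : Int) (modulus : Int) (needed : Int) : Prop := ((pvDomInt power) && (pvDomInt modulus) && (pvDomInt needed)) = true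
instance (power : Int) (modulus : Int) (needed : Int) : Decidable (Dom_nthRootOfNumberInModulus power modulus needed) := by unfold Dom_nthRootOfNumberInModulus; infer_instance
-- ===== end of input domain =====

-- B replaces A's interleaved two-accumulator scan (full bignum pow + linear membership test)
-- with a hash index grouping bases by modular power, read twice; return value only, no side effects.

-- ===== PORT A =====
-- literal port of A: modRange = [x for x in range(modulus) if x >= 1]; the while-loop with
-- i = 1, i += 1 is range(1, modulus); pow(i, power) is exact for power ≥ 0 (Pre_)
def nthRootOfNumberInModulus (power : Int) (modulus : Int) (needed : Int) : List Int × List Int :=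
  let modRange := (PySem.List.pyRange 0 modulus 1).filter (fun x => decide (x ≥ 1))
  (PySem.List.pyRange 1 modulus 1).foldl
    (fun (st : List Int × List Int) i =>
      let computedPow := PySem.Int.mod (i ^ power.toNat) modulus
      let st1 := if modRange.contains computedPow then (st.1 ++ [i], st.2) else st
      if computedPow = needed then (st1.1, st1.2 ++ [i]) else st1)
    ([], [])

-- ===== PORT B =====
-- literal port of Source B: buckets.setdefault(pow(i, power, modulus), []).append(i) is
-- Dict.modify k [] (· ++ [i]); three-argument pow is PySem.Int.powMod (power.toNat is exact
-- for power ≥ 0, which Pre_ guarantees); then sorted merge of nonzero buckets + one lookup.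
def nthRootOfNumberInModulus_alt (power : Int) (modulus : Int) (needed : Int) : List Int × List Int :=
  let buckets := (PySem.List.pyRange 1 modulus 1).foldl
    (fun (d : PySem.Dict Int (List Int)) i =>
      d.modify (PySem.Int.powMod i power.toNat modulus) [] (fun xs => xs ++ [i]))
    PySem.Dict.empty
  (PySem.List.sorted ((buckets.items.filter (fun p => decide (p.1 ≠ 0))).flatMap (fun p => p.2)) (fun x => x),
   buckets.getD needed [])

-- ===== PRECONDITION & SPEC =====
-- Pre_ excludes negative power, on which Python's pow(i, power) yields floats (e.g. pow(2,-1)=0.5):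
-- the float-valued comparisons cannot be ported under the Int convention, though A still returns a list value there.
def Pre_nthRootOfNumberInModulus (power : Int) (modulus : Int) (needed : Int) : Prop := 0 ≤ power
instance (power : Int) (modulus : Int) (needed : Int) : Decidable (Pre_nthRootOfNumberInModulus power modulus needed) := by unfold Pre_nthRootOfNumberInModulus; infer_instance
def pvWitness_nthRootOfNumberInModulus : Int × Int × Int := (3, 7, 1)

def Spec_nthRootOfNumberInModulus (power : Int) (modulus : Int) (needed : Int) (out : List Int × List Int) : Prop := out = nthRootOfNumberInModulus_alt power modulus needed
instance (power : Int) (modulus : Int) (needed : Int) (out : List Int × List Int) : Decidable (Spec_nthRootOfNumberInModulus power modulus needed out) := by unfold Spec_nthRootOfNumberInModulus; infer_instance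

-- ===== CLAIM (what is proved, stated in full; the proofs are below) =====
def Claim_equal_nthRootOfNumberInModulus : Prop := ∀ (power : Int) (modulus : Int) (needed : Int), Dom_nthRootOfNumberInModulus power modulus needed → Pre_nthRootOfNumberInModulus power modulus needed → Spec_nthRootOfNumberInModulus power modulus needed (nthRootOfNumberInModulus power modulus needed)

-- ===== LEMMAS AND PROOFS =====

-- A's fold, with accumulators prepended, is the two filters of the range
theorem pv_fold_shape (g : Int → Int) (needed : Int) (l : List Int) (h a : List Int)
    (contains : Int → Bool)
    (hc : ∀ i ∈ l, contains (g i) = decide (g i ≠ 0)) :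
    l.foldl
      (fun (st : List Int × List Int) i =>
        let st1 := if contains (g i) then (st.1 ++ [i], st.2) else st
        if g i = needed then (st1.1, st1.2 ++ [i]) else st1)
      (h, a)
    = (h ++ l.filter (fun i => decide (g i ≠ 0)),
       a ++ l.filter (fun i => decide (g i = needed))) := by
  induction l generalizing h a with
  | nil => simp
  | cons x xs ih =>
    have hx := hc x (by simp)
    simp only [List.foldl_cons, List.filter_cons]
    rw [ih _ _ (fun i hi => hc i (by simp [hi]))]
    rw [hx]
    by_cases h0 : g x = 0
    · by_cases hn : g x = needed
      · rw [h0] at hn; subst hn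
        simp [h0]
      · rw [h0] at hn
        simp [h0, hn]
    · by_cases hn : g x = needed
      · rw [hn] at h0
        simp [hn, h0]
      · simp [h0, hn]

-- two disjoint filters concatenated are a permutation of the filter of the disjunction
theorem pv_filter_or_perm (p q : Int → Bool) (l : List Int) (h : ∀ x, ¬(p x = true ∧ q x = true)) :
    (l.filter p ++ l.filter q).Perm (l.filter (fun x => p x || q x)) := by
  induction l with
  | nil => simp
  | cons x xs ih =>
    by_cases hp : p x = true
    · have hq : q x = false := by
        rcases Bool.eq_false_or_eq_true (q x) with h' | h'
        · exact absurd ⟨hp, h'⟩ (h x)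
        · exact h'
      simp only [List.filter_cons, hp, hq, if_true, if_false, Bool.false_eq_true, Bool.true_or,
        List.cons_append]
      exact ih.cons x
    · have hp' : p x = false := by simpa using hp
      by_cases hq : q x = true
      · simp only [List.filter_cons, hp', hq, Bool.false_eq_true, if_false, if_true,
          Bool.false_or]
        exact (List.perm_middle).trans (ih.cons x)
      · have hq' : q x = false := by simpa using hq
        simp only [List.filter_cons, hp', hq', Bool.false_eq_true, if_false, Bool.false_or]
        exact ih

-- a Nodup key list's buckets, concatenated, are a permutation of the filter by key membership
theorem pv_flatMap_buckets_perm (f : Int → Int) (l : List Int) (K : List Int) (hK : K.Nodup) :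
    (K.flatMap (fun k => l.filter (fun x => f x == k))).Perm
      (l.filter (fun x => decide (f x ∈ K))) := by
  induction K with
  | nil => simp
  | cons k K ih =>
    have hk : k ∉ K := (List.nodup_cons.mp hK).1
    have hK' : K.Nodup := (List.nodup_cons.mp hK).2
    simp only [List.flatMap_cons]
    have h1 : (l.filter (fun x => f x == k) ++ K.flatMap (fun k => l.filter (fun x => f x == k))).Perm
        (l.filter (fun x => f x == k) ++ l.filter (fun x => decide (f x ∈ K))) :=
      (ih hK').append_left _
    refine h1.trans ?_
    have h2 := pv_filter_or_perm (fun x => f x == k) (fun x => decide (f x ∈ K)) l ?_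
    · refine h2.trans (List.Perm.of_eq (List.filter_congr ?_))
      intro x _
      by_cases h : f x = k
      · simp [h]
      · simp [h]
    · intro x hx
      have h1' : f x = k := by simpa using hx.1
      exact hk (h1' ▸ (by simpa using hx.2))

theorem pv_main (g : Int → Int) (modulus needed : Int)
    (hmem0 : ∀ i ∈ PySem.List.pyRange 1 modulus 1, 0 ≤ g i ∧ g i < modulus) :
    (PySem.List.pyRange 1 modulus 1).foldl
      (fun (st : List Int × List Int) i =>
        let st1 := if ((PySem.List.pyRange 0 modulus 1).filter (fun x => decide (x ≥ 1))).contains (g i)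
          then (st.1 ++ [i], st.2) else st
        if g i = needed then (st1.1, st1.2 ++ [i]) else st1)
      ([], [])
    = (PySem.List.sorted (((((PySem.List.pyRange 1 modulus 1).foldl
          (fun (d : PySem.Dict Int (List Int)) i => d.modify (g i) [] (fun xs => xs ++ [i]))
          PySem.Dict.empty).items.filter (fun p => decide (p.1 ≠ 0))).flatMap (fun p => p.2))) (fun x => x),
       ((PySem.List.pyRange 1 modulus 1).foldl
          (fun (d : PySem.Dict Int (List Int)) i => d.modify (g i) [] (fun xs => xs ++ [i]))
          PySem.Dict.empty).getD needed []) := by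
  set l : List Int := PySem.List.pyRange 1 modulus 1 with hl
  -- A side
  rw [pv_fold_shape g needed l [] [] _ ?hc]
  case hc =>
    intro i hi
    obtain ⟨h0, h1⟩ := hmem0 i hi
    by_cases hz : g i = 0
    · simp only [hz, decide_eq_false (by simp : ¬(0:Int) ≠ 0)]
      simp [List.mem_filter, PySem.List.mem_pyRange_one]
    · simp only [decide_eq_true (show g i ≠ 0 from hz)]
      have : g i ∈ (PySem.List.pyRange 0 modulus 1).filter (fun x => decide (x ≥ 1)) := by
        simp only [List.mem_filter, PySem.List.mem_pyRange_one]
        exact ⟨⟨h0, h1⟩, by simpa using (show (1:Int) ≤ g i by omega)⟩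
      simp [this]
  simp only [List.nil_append]
  -- B side: the bucket dict
  set D : PySem.Dict Int (List Int) := l.foldl
      (fun (d : PySem.Dict Int (List Int)) i => d.modify (g i) [] (fun xs => xs ++ [i]))
      PySem.Dict.empty with hD
  have hfold : D = (l.map (fun i => (g i, i))).foldl
        (fun (d : PySem.Dict Int (List Int)) p => d.modify p.1 [] (fun xs => xs ++ [p.2]))
        PySem.Dict.empty := by
    rw [hD, List.foldl_map]
  -- lookup: each bucket is the filter of the range by that residue
  have hgetD : ∀ c : Int, D.getD c [] = l.filter (fun i => g i == c) := by
    intro c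
    rw [hfold, PySem.Dict.getD_foldl_modify_append]
    simp [List.filter_map, Function.comp_def]
  -- keys: the distinct residues, in order
  have hkeys : D.keys = PySem.Set.ofList (l.map g) := by
    rw [hD, PySem.Dict.keys_foldl_modify_key l g [] (fun _ i xs => xs ++ [i])]
    simp [PySem.Set.update_nil_left]
  have hnodup : D.keys.Nodup := by
    rw [hkeys]; exact PySem.Set.nodup_ofList _
  have hitems : D.items = D.keys.map (fun k => (k, D.getD k [])) :=
    PySem.Dict.items_eq_map_keys D hnodup []
  -- first component: the merged nonzero buckets are a permutation of the ordered filter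
  have hflat : ((D.items.filter (fun p => decide (p.1 ≠ 0))).flatMap (fun p => p.2))
      = (D.keys.filter (fun k => decide (k ≠ 0))).flatMap (fun k => l.filter (fun i => g i == k)) := by
    rw [hitems, List.filter_map]
    simp only [List.flatMap_map, Function.comp_def]
    simp only [hgetD]
  have hnodupK : (D.keys.filter (fun k => decide (k ≠ 0))).Nodup := List.Nodup.filter _ hnodup
  have hperm : ((D.items.filter (fun p => decide (p.1 ≠ 0))).flatMap (fun p => p.2)).Perm
      (l.filter (fun i => decide (g i ≠ 0))) := by
    rw [hflat]
    refine (pv_flatMap_buckets_perm g l _ hnodupK).trans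
      (List.Perm.of_eq (List.filter_congr ?_))
    intro x hx
    have hxK : g x ∈ PySem.Set.ofList (l.map g) := by
      rw [PySem.Set.mem_ofList]
      exact List.mem_map_of_mem hx
    by_cases hz : g x = 0
    · simp [hz, List.mem_filter, hkeys]
    · simp [hz, List.mem_filter, hkeys, hxK]
  have hsorted : PySem.List.sorted
      ((D.items.filter (fun p => decide (p.1 ≠ 0))).flatMap (fun p => p.2)) (fun x => x)
      = l.filter (fun i => decide (g i ≠ 0)) := by
    refine PySem.List.sorted_eq_of_perm_of_pairwise_lt _ _ _ hperm.symm ?_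
    exact List.Pairwise.sublist List.filter_sublist (PySem.List.pairwise_lt_pyRange_one 1 modulus)
  refine Prod.ext ?_ ?_
  · simpa using hsorted.symm
  · rw [hgetD needed]
    rfl

theorem nthRoot_spec_aux (power modulus needed : Int) (_hp : 0 ≤ power) :
    nthRootOfNumberInModulus power modulus needed
      = nthRootOfNumberInModulus_alt power modulus needed := by
  unfold nthRootOfNumberInModulus nthRootOfNumberInModulus_alt
  simp only [PySem.Int.powMod_eq]
  refine pv_main (fun i => PySem.Int.mod (i ^ power.toNat) modulus) modulus needed ?_
  intro i hi
  have hm := (PySem.List.mem_pyRange_one).1 hi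
  have hmpos : 0 < modulus := by omega
  exact ⟨PySem.Int.mod_nonneg _ hmpos, PySem.Int.mod_lt _ hmpos⟩

-- ===== VERDICT (by name: the statement is the Claim_ definition above) =====
theorem nthRootOfNumberInModulus_spec : Claim_equal_nthRootOfNumberInModulus := by
  intro power modulus needed _ hp
  exact nthRoot_spec_aux power modulus needed hp
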